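-- pv_equiv track=rewrite | github.com/JoelAlgera/Comp359-GraphColouring | graph.py | calculate_pos
-- ===== SOURCE A (Python) =====
-- from collections import deque,defaultdict
--
-- def calculate_pos(graph, root, width, spacer): #this lays out the nodes in the pattern of a BFS tree, it need some work because of it has crossing of the edges
--
--     visited= set([root])
--     levels= defaultdict(list)
--
--     queue= deque([(root,0)])
--     while queue:
--         node, depth = queue.popleft()
--         levels[depth].append(node)
--
--         for x in graph[node]:
--             if x not in visited:
--                 visited.add(x)
--                 queue.append((x,depth +1)) #append as a pair
--
--     pos = {}
--
--     for depth, nodes in levels.items():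
--         #I need to return 2 pos where the nodes are and track that to draw the lines to connect them so I also need a way to track it
--
--         #the y depends on the depth
--         y= 100 + depth * spacer
--         align = width // (len(nodes)+1)
--
--         #now for x depends on align and number of nodes
--
--         for i, node in enumerate(nodes):
--             x= spacer + align * (i+1)
--             pos[node] = (x,y)
--
--     return pos
-- ===== SOURCE B (Python) =====
-- def calculate_pos(graph, root, width, spacer):
--     # One-pass level-synchronous BFS: positions are assigned while traversing,
--     # so the levels dict and the second pass disappear.
--     pos = {}
--     visited = {root}
--     frontier = [root]
--     depth = 0
--     while frontier:
--         y = 100 + depth * spacer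
--         align = width // (len(frontier) + 1)
--         nxt = []
--         for i, node in enumerate(frontier):
--             pos[node] = (spacer + align * (i + 1), y)
--             for x in graph[node]:
--                 if x not in visited:
--                     visited.add(x)
--                     nxt.append(x)
--         frontier = nxt
--         depth += 1
--     return pos
-- ===== Notes on version B (the rewrite author's own statement) =====
-- stated objective: simpler
-- what changed: Replaces the deque-plus-levels-dict BFS followed by a second positioning pass with a single level-synchronous BFS that assigns each node's position in the same loop that discovers the next frontier (no levels dict, no second pass).
import Mathlib
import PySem

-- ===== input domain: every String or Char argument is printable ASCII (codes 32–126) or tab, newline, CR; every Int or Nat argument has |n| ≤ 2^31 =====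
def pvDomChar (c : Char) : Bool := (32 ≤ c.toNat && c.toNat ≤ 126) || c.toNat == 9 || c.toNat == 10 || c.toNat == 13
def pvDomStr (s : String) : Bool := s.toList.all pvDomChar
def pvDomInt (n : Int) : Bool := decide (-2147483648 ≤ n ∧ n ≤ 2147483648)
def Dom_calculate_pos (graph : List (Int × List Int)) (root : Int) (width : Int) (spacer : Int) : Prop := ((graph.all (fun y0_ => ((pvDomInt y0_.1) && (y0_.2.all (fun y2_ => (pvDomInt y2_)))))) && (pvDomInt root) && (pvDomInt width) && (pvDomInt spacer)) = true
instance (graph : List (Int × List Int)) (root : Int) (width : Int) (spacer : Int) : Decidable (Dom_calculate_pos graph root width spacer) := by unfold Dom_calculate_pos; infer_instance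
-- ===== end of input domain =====

-- B replaces the deque+levels-dict BFS and its second positioning pass with one
-- level-synchronous BFS assigning positions while traversing (objective: simpler; return value only).

-- ===== PORT A =====
-- the deque loop: pop (node, depth), append node to levels[depth], push unvisited neighbours at depth+1.
-- fuel (graph.length + 1) bounds the number of dequeues; under Pre_ it is proved sufficient (each
-- dequeued node was freshly added to `visited`, and visited ⊆ keys ∪ {root} ⊆ keys).
def bfsA (G : PySem.Dict Int (List Int)) : Nat → List (Int × Int) → PySem.Set Int → PySem.Dict Int (List Int) → PySem.Dict Int (List Int)
  | 0, _, _, L => L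
  | _ + 1, [], _, L => L
  | fuel + 1, (node, depth) :: rest, visited, L =>
    let L' := L.modify depth [] (· ++ [node])
    let s := (G.getD node []).foldl
      (fun s x => if s.1.contains x then s else (PySem.Set.add s.1 x, s.2 ++ [(x, depth + 1)]))
      (visited, rest)
    bfsA G fuel s.2 s.1 L'

def calculate_pos (graph : List (Int × List Int)) (root : Int) (width : Int) (spacer : Int) : List (Int × Int × Int) :=
  let G := PySem.Dict.ofList graph
  let levels := bfsA G (graph.length + 1) [(root, 0)] (PySem.Set.ofList [root]) PySem.Dict.empty
  -- second pass: for depth, nodes in levels.items(): y, align, then pos[node] = (x, y)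
  let pos := levels.items.foldl
    (fun pos dn =>
      let y := 100 + dn.1 * spacer
      let align := PySem.Int.floordiv width ((dn.2.length : Int) + 1)
      (PySem.List.enumerate dn.2).foldl
        (fun pos inode => pos.insert inode.2 (spacer + align * (inode.1 + 1), y)) pos)
    PySem.Dict.empty
  pos.items

-- ===== PORT B =====
-- one level-synchronous loop: position the whole frontier, collect the next frontier, recurse.
-- fuel (graph.length + 1) bounds the number of levels; under Pre_ it is proved sufficient.
def levelB (G : PySem.Dict Int (List Int)) (width spacer : Int) : Nat → List Int → Int → PySem.Set Int → PySem.Dict Int (Int × Int) → PySem.Dict Int (Int × Int)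
  | 0, _, _, _, pos => pos
  | _ + 1, [], _, _, pos => pos
  | fuel + 1, frontier@(_ :: _), depth, visited, pos =>
    let y := 100 + depth * spacer
    let align := PySem.Int.floordiv width ((frontier.length : Int) + 1)
    let s := (PySem.List.enumerate frontier).foldl
      (fun s inode =>
        (s.1.insert inode.2 (spacer + align * (inode.1 + 1), y),
         (G.getD inode.2 []).foldl
           (fun t x => if t.1.contains x then t else (PySem.Set.add t.1 x, t.2 ++ [x])) s.2))
      (pos, visited, ([] : List Int))
    levelB G width spacer fuel s.2.2 (depth + 1) s.2.1 s.1

def calculate_pos_alt (graph : List (Int × List Int)) (root : Int) (width : Int) (spacer : Int) : List (Int × Int × Int) :=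
  let G := PySem.Dict.ofList graph
  (levelB G width spacer (graph.length + 1) [root] 0 (PySem.Set.ofList [root]) PySem.Dict.empty).items

-- ===== PRECONDITION & SPEC =====
-- pvReach computes the set of keys reachable from root (a graph-theoretic closure of the input,
-- saturated after graph.length steps; it mentions no queue, depth or position of either port).
def pvGrow (graph : List (Int × List Int)) (S : PySem.Set Int) : PySem.Set Int :=
  PySem.Set.update S
    ((graph.filter (fun p => S.contains p.1)).flatMap
      (fun p => p.2.filter (fun x => (graph.map Prod.fst).contains x)))

def pvIter (graph : List (Int × List Int)) : Nat → PySem.Set Int → PySem.Set Int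
  | 0, S => S
  | n + 1, S => pvIter graph n (pvGrow graph S)

def pvReach (graph : List (Int × List Int)) (root : Int) : PySem.Set Int :=
  pvIter graph (graph.length + 1) (PySem.Set.ofList [root])

-- Pre_ excludes (a) inputs on which A raises KeyError — root missing, or a node reachable from
-- root having a neighbour that is not a key — and (b) association lists with duplicate keys
-- (a Python dict cannot carry them; the list→dict reading is the corner, see the cite).
def Pre_calculate_pos (graph : List (Int × List Int)) (root : Int) (width : Int) (spacer : Int) : Prop :=
  (graph.map Prod.fst).Nodup ∧ root ∈ graph.map Prod.fst ∧
    ∀ p ∈ graph, p.1 ∈ pvReach graph root → ∀ x ∈ p.2, x ∈ graph.map Prod.fst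
instance (graph : List (Int × List Int)) (root : Int) (width : Int) (spacer : Int) : Decidable (Pre_calculate_pos graph root width spacer) := by unfold Pre_calculate_pos; infer_instance

def pvWitness_calculate_pos : (List (Int × List Int)) × Int × Int × Int := ([(0, [1, 2]), (1, [0]), (2, [])], 0, 10, 2)

def Spec_calculate_pos (graph : List (Int × List Int)) (root : Int) (width : Int) (spacer : Int) (out : List (Int × Int × Int)) : Prop := out = calculate_pos_alt graph root width spacer
instance (graph : List (Int × List Int)) (root : Int) (width : Int) (spacer : Int) (out : List (Int × Int × Int)) : Decidable (Spec_calculate_pos graph root width spacer out) := by unfold Spec_calculate_pos; infer_instance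

-- ===== CLAIM (what is proved, stated in full; the proofs are below) =====
def Claim_equal_calculate_pos : Prop := ∀ (graph : List (Int × List Int)) (root : Int) (width : Int) (spacer : Int), Dom_calculate_pos graph root width spacer → Pre_calculate_pos graph root width spacer → Spec_calculate_pos graph root width spacer (calculate_pos graph root width spacer)

-- ===== LEMMAS AND PROOFS =====

-- proof-side vocabulary: the per-node neighbour expansion, the per-level step, and the frontier list
def expandS (G : PySem.Dict Int (List Int)) (s : PySem.Set Int × List Int) (n : Int) : PySem.Set Int × List Int :=
  (G.getD n []).foldl (fun t x => if t.1.contains x then t else (PySem.Set.add t.1 x, t.2 ++ [x])) s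

def stepL (G : PySem.Dict Int (List Int)) (cur : List Int) (v : PySem.Set Int) : PySem.Set Int × List Int :=
  cur.foldl (expandS G) (v, [])

def fronts (G : PySem.Dict Int (List Int)) : Nat → List Int → PySem.Set Int → List (List Int)
  | 0, _, _ => []
  | _ + 1, [], _ => []
  | k + 1, cur@(_ :: _), v => cur :: fronts G k (stepL G cur v).2 (stepL G cur v).1

def nthF (G : PySem.Dict Int (List Int)) : Nat → List Int → PySem.Set Int → List Int × PySem.Set Int
  | 0, cur, v => (cur, v)
  | k + 1, cur, v => nthF G k (stepL G cur v).2 (stepL G cur v).1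

def posLevel (width spacer d : Int) (pos : PySem.Dict Int (Int × Int)) (c : List Int) : PySem.Dict Int (Int × Int) :=
  let y := 100 + d * spacer
  let align := PySem.Int.floordiv width ((c.length : Int) + 1)
  (PySem.List.enumerate c).foldl
    (fun pos inode => pos.insert inode.2 (spacer + align * (inode.1 + 1), y)) pos

def posLevels (width spacer : Int) : Int → PySem.Dict Int (Int × Int) → List (List Int) → PySem.Dict Int (Int × Int)
  | _, pos, [] => pos
  | d, pos, c :: cs => posLevels width spacer (d + 1) (posLevel width spacer d pos c) cs

def addLevels : Int → PySem.Dict Int (List Int) → List (List Int) → PySem.Dict Int (List Int)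
  | _, L, [] => L
  | d, L, c :: cs => addLevels (d + 1) (c.foldl (fun L n => L.modify d [] (· ++ [n])) L) cs

-- (L1) A's neighbour fold on the tagged queue is expandS on the untagged state
theorem foldAB_aux (d : Int) :
    ∀ (ns : List Int) (v : PySem.Set Int) (nxt : List Int) (q0 : List (Int × Int)),
      ns.foldl
          (fun s x => if s.1.contains x then s else (PySem.Set.add s.1 x, s.2 ++ [(x, d)]))
          (v, q0 ++ nxt.map (fun m => (m, d)))
        = ((ns.foldl (fun t x => if t.1.contains x then t else (PySem.Set.add t.1 x, t.2 ++ [x])) (v, nxt)).1,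
           q0 ++ (ns.foldl (fun t x => if t.1.contains x then t else (PySem.Set.add t.1 x, t.2 ++ [x])) (v, nxt)).2.map (fun m => (m, d))) := by
  intro ns
  induction ns with
  | nil => intro v nxt q0; rfl
  | cons x t ih =>
    intro v nxt q0
    simp only [List.foldl_cons]
    by_cases h : v.contains x
    · simp only [h, if_true]; exact ih v nxt q0
    · simp only [if_neg h]
      have : (q0 ++ nxt.map (fun m => (m, d))) ++ [(x, d)]
          = q0 ++ (nxt ++ [x]).map (fun m => (m, d)) := by
        simp [List.map_append]
      rw [this]
      exact ih (PySem.Set.add v x) (nxt ++ [x]) q0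

theorem foldAB (G : PySem.Dict Int (List Int)) (n d : Int)
    (v : PySem.Set Int) (nxt : List Int) (q0 : List (Int × Int)) :
      (G.getD n []).foldl
          (fun s x => if s.1.contains x then s else (PySem.Set.add s.1 x, s.2 ++ [(x, d)]))
          (v, q0 ++ nxt.map (fun m => (m, d)))
        = ((expandS G (v, nxt) n).1, q0 ++ (expandS G (v, nxt) n).2.map (fun m => (m, d))) :=
  foldAB_aux d (G.getD n []) v nxt q0

-- (L2) running A through one whole level
theorem bfsA_level (G : PySem.Dict Int (List Int)) :
    ∀ (cur : List Int) (fuel : Nat) (nxt : List Int) (v : PySem.Set Int)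
      (L : PySem.Dict Int (List Int)) (d : Int), cur.length ≤ fuel →
      bfsA G fuel (cur.map (fun m => (m, d)) ++ nxt.map (fun m => (m, d + 1))) v L
        = bfsA G (fuel - cur.length)
            ((cur.foldl (expandS G) (v, nxt)).2.map (fun m => (m, d + 1)))
            (cur.foldl (expandS G) (v, nxt)).1
            (cur.foldl (fun L m => L.modify d [] (· ++ [m])) L) := by
  intro cur
  induction cur with
  | nil => intro fuel nxt v L d _; rfl
  | cons c cs ih =>
    intro fuel nxt v L d hf
    match fuel, hf with
    | fuel + 1, hf =>
      show bfsA G (fuel + 1) ((c, d) :: (cs.map (fun m => (m, d)) ++ nxt.map (fun m => (m, d + 1)))) v L = _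
      rw [bfsA]
      rw [foldAB G c (d + 1) v nxt (cs.map (fun m => (m, d)))]
      have := ih fuel (expandS G (v, nxt) c).2 (expandS G (v, nxt) c).1 (L.modify d [] (· ++ [c])) d
        (by simp at hf; omega)
      simp only [List.foldl_cons]
      rw [this]
      have : fuel + 1 - (c :: cs).length = fuel - cs.length := by simp [Nat.succ_sub_succ]
      rw [this]

-- (L3) with enough fuel, A's BFS builds addLevels of the frontier list
theorem bfsA_fronts (G : PySem.Dict Int (List Int)) :
    ∀ (k : Nat) (cur : List Int) (v : PySem.Set Int) (L : PySem.Dict Int (List Int)) (d : Int) (fuel : Nat),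
      (nthF G k cur v).1 = [] → ((fronts G k cur v).map List.length).sum ≤ fuel →
      bfsA G fuel (cur.map (fun m => (m, d))) v L = addLevels d L (fronts G k cur v) := by
  intro k
  induction k with
  | zero =>
    intro cur v L d fuel h _
    simp only [nthF] at h; subst h
    cases fuel <;> rfl
  | succ k ih =>
    intro cur v L d fuel h hs
    cases cur with
    | nil => cases fuel <;> rfl
    | cons c cs =>
      have hstep : fronts G (k + 1) (c :: cs) v
          = (c :: cs) :: fronts G k (stepL G (c :: cs) v).2 (stepL G (c :: cs) v).1 := rfl
      rw [hstep] at hs ⊢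
      simp only [List.map_cons, List.sum_cons] at hs
      have hlen : (c :: cs).length ≤ fuel := by simp at hs ⊢; omega
      have hrun := bfsA_level G (c :: cs) fuel [] v L d hlen
      simp only [List.map_nil, List.append_nil] at hrun
      rw [hrun]
      show bfsA G (fuel - (c :: cs).length) _ _ _
          = addLevels (d + 1) ((c :: cs).foldl (fun L m => L.modify d [] (· ++ [m])) L)
              (fronts G k (stepL G (c :: cs) v).2 (stepL G (c :: cs) v).1)
      exact ih (stepL G (c :: cs) v).2 (stepL G (c :: cs) v).1 _ (d + 1) (fuel - (c :: cs).length)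
        h (by simp at hs ⊢; omega)

theorem pvEnum_map_snd {alpha : Type} : ∀ (l : List alpha) (st : Int), (PySem.List.enumerate l st).map Prod.snd = l := by
  intro l
  induction l with
  | nil => intro st; rfl
  | cons x t ih => intro st; simp [PySem.List.enumerate, ih]

-- (L4) B's loop is posLevels over the same frontier list
theorem levelB_fronts (G : PySem.Dict Int (List Int)) (width spacer : Int) :
    ∀ (k : Nat) (cur : List Int) (v : PySem.Set Int) (pos : PySem.Dict Int (Int × Int)) (d : Int) (fuel : Nat),
      (nthF G k cur v).1 = [] → k ≤ fuel →
      levelB G width spacer fuel cur d v pos = posLevels width spacer d pos (fronts G k cur v) := by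
  intro k
  induction k with
  | zero =>
    intro cur v pos d fuel h _
    simp only [nthF] at h; subst h
    cases fuel <;> rfl
  | succ k ih =>
    intro cur v pos d fuel h hk
    cases cur with
    | nil => cases fuel <;> rfl
    | cons c cs =>
      match fuel, hk with
      | fuel + 1, hk =>
        have hsplit :
            (PySem.List.enumerate (c :: cs)).foldl
              (fun s inode =>
                (s.1.insert inode.2 (spacer + PySem.Int.floordiv width (((c :: cs).length : Int) + 1) * (inode.1 + 1), 100 + d * spacer),
                 (G.getD inode.2 []).foldl
                   (fun t x => if t.1.contains x then t else (PySem.Set.add t.1 x, t.2 ++ [x])) s.2))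
              (pos, v, ([] : List Int))
            = (posLevel width spacer d pos (c :: cs), stepL G (c :: cs) v) := by
          have hpm := PySem.List.foldl_prod_mk
            (fun (p : PySem.Dict Int (Int × Int)) (inode : Int × Int) =>
              p.insert inode.2 (spacer + PySem.Int.floordiv width (((c :: cs).length : Int) + 1) * (inode.1 + 1), 100 + d * spacer))
            (fun (t : PySem.Set Int × List Int) (inode : Int × Int) => expandS G t inode.2)
            (PySem.List.enumerate (c :: cs)) pos (v, ([] : List Int))
          refine hpm.trans ?_
          refine congrArg₂ Prod.mk rfl ?_
          rw [show (fun (t : PySem.Set Int × List Int) (e : Int × Int) => expandS G t e.2)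
              = (fun t e => expandS G t ((fun x : Int × Int => x.2) e)) from rfl,
            ← List.foldl_map]
          show List.foldl (expandS G) (v, []) ((PySem.List.enumerate (c :: cs)).map Prod.snd) = stepL G (c :: cs) v
          rw [pvEnum_map_snd]
          rfl
        have heq : levelB G width spacer (fuel + 1) (c :: cs) d v pos
            = levelB G width spacer fuel (stepL G (c :: cs) v).2 (d + 1) (stepL G (c :: cs) v).1
                (posLevel width spacer d pos (c :: cs)) := by
          rw [levelB]
          show (fun s : PySem.Dict Int (Int × Int) × PySem.Set Int × List Int =>
                levelB G width spacer fuel s.2.2 (d + 1) s.2.1 s.1)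
              ((PySem.List.enumerate (c :: cs)).foldl
                (fun s inode =>
                  (s.1.insert inode.2 (spacer + PySem.Int.floordiv width (((c :: cs).length : Int) + 1) * (inode.1 + 1), 100 + d * spacer),
                   (G.getD inode.2 []).foldl
                     (fun t x => if t.1.contains x then t else (PySem.Set.add t.1 x, t.2 ++ [x])) s.2))
                (pos, v, ([] : List Int))) = _
          rw [hsplit]
        rw [heq]
        exact ih (stepL G (c :: cs) v).2 (stepL G (c :: cs) v).1 _ (d + 1) fuel h (by omega)

-- (L5) the items of the levels dict are the enumerated frontier list
theorem pv_get_mk_last (dd : Int) (acc : List Int) :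
    ∀ (its : List (Int × List Int)), (∀ p ∈ its, p.1 ≠ dd) →
      (PySem.Dict.mk (its ++ [(dd, acc)]) : PySem.Dict Int (List Int)).get? dd = some acc := by
  intro its
  induction its with
  | nil => intro _; simp [PySem.Dict.get?_mk_cons]
  | cons p t ih =>
    intro h
    obtain ⟨a, b⟩ := p
    rw [List.cons_append, PySem.Dict.get?_mk_cons]
    have ha : a ≠ dd := by simpa using h (a, b) (by simp)
    simp only [beq_eq_false_iff_ne.mpr ha, if_false]
    exact ih (fun q hq => h q (by simp [hq]))

theorem pv_run_modify (dd : Int) :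
    ∀ (xs : List Int) (its : List (Int × List Int)) (acc : List Int),
      (∀ p ∈ its, p.1 ≠ dd) →
      xs.foldl (fun L n => L.modify dd [] (· ++ [n])) (PySem.Dict.mk (its ++ [(dd, acc)]))
        = PySem.Dict.mk (its ++ [(dd, acc ++ xs)]) := by
  intro xs
  induction xs with
  | nil => intro its acc _; simp
  | cons n t ih =>
    intro its acc h
    rw [List.foldl_cons]
    have hget := pv_get_mk_last dd acc its h
    have hstep : (PySem.Dict.mk (its ++ [(dd, acc)]) : PySem.Dict Int (List Int)).modify dd [] (· ++ [n])
        = PySem.Dict.mk (its ++ [(dd, acc ++ [n])]) := by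
      rw [PySem.Dict.modify, PySem.Dict.getD_eq_get?_getD, hget]
      rw [PySem.Dict.insert]
      rw [if_pos (by rw [PySem.Dict.contains_eq_isSome_get?, hget]; rfl)]
      apply PySem.Dict.ext
      show (its ++ [(dd, acc)]).map _ = _
      rw [List.map_append]
      congr 1
      · refine (List.map_congr_left ?_).trans (List.map_id _)
        intro p hp
        simp only [beq_eq_false_iff_ne.mpr (h p hp), if_false, id]
        simp
      · simp
    rw [hstep, ih its (acc ++ [n]) h, List.append_assoc]
    simp

theorem pv_addLevel (dd : Int) (c : List Int) (hc : c ≠ []) (L : PySem.Dict Int (List Int))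
    (hL : L.contains dd = false) :
    c.foldl (fun L n => L.modify dd [] (· ++ [n])) L = PySem.Dict.mk (L.items ++ [(dd, c)]) := by
  obtain ⟨x, xs, rfl⟩ := List.exists_cons_of_ne_nil hc
  have hmem : ∀ p ∈ L.items, p.1 ≠ dd := by
    intro p hp hpe
    have : L.contains dd = true := by
      rw [show L = PySem.Dict.mk L.items from rfl, PySem.Dict.contains_mk]
      exact List.any_eq_true.mpr ⟨p, hp, by simp [hpe]⟩
    simp [this] at hL
  have hstep : L.modify dd [] (· ++ [x]) = PySem.Dict.mk (L.items ++ [(dd, [x])]) := by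
    rw [PySem.Dict.modify, PySem.Dict.getD_of_not_contains L [] hL]
    rw [PySem.Dict.insert, if_neg (by simp [hL])]
    rfl
  rw [List.foldl_cons, hstep, pv_run_modify dd xs L.items [x] hmem]
  rfl

theorem addLevels_items :
    ∀ (F : List (List Int)) (L : PySem.Dict Int (List Int)) (d : Int),
      (∀ c ∈ F, c ≠ []) → (∀ j : Int, d ≤ j → L.contains j = false) →
      (addLevels d L F).items = L.items ++ PySem.List.enumerate F d := by
  intro F
  induction F with
  | nil => intro L d _ _; simp [addLevels, PySem.List.enumerate]
  | cons c cs ih =>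
    intro L d hne hco
    rw [show addLevels d L (c :: cs) = addLevels (d + 1) (c.foldl (fun L n => L.modify d [] (· ++ [n])) L) cs from rfl]
    rw [pv_addLevel d c (hne c (by simp)) L (hco d le_rfl)]
    rw [ih _ (d + 1) (fun e he => hne e (by simp [he])) ?fresh]
    · rw [show PySem.List.enumerate (c :: cs) d = (d, c) :: PySem.List.enumerate cs (d + 1) from rfl]
      simp
    case fresh =>
      intro j hj
      rw [PySem.Dict.contains_mk, List.any_append]
      have h1 : L.items.any (fun p => p.1 == j) = false := by
        have := hco j (by omega)
        rwa [show L.contains j = L.items.any (fun p => p.1 == j) from rfl] at this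
      have h2 : (d == j) = false := by simp; omega
      simp [h1, h2]

-- (L6) A's second pass over the enumerated frontiers is posLevels
theorem pass2_posLevels (width spacer : Int) :
    ∀ (F : List (List Int)) (pos : PySem.Dict Int (Int × Int)) (d : Int),
      (PySem.List.enumerate F d).foldl
          (fun pos dn =>
            (PySem.List.enumerate dn.2).foldl
              (fun pos inode =>
                pos.insert inode.2
                  (spacer + PySem.Int.floordiv width ((dn.2.length : Int) + 1) * (inode.1 + 1), 100 + dn.1 * spacer))
              pos)
          pos
        = posLevels width spacer d pos F := by
  intro F
  induction F with
  | nil => intro pos d; rfl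
  | cons c cs ih =>
    intro pos d
    rw [show PySem.List.enumerate (c :: cs) d = (d, c) :: PySem.List.enumerate cs (d + 1) from rfl,
      List.foldl_cons]
    exact ih _ (d + 1)

-- (L7) every frontier in the list is nonempty
theorem fronts_ne_nil (G : PySem.Dict Int (List Int)) :
    ∀ (k : Nat) (cur : List Int) (v : PySem.Set Int), ∀ c ∈ fronts G k cur v, c ≠ [] := by
  intro k
  induction k with
  | zero => intro cur v c hc; simp [fronts] at hc
  | succ k ih =>
    intro cur v c hc
    cases cur with
    | nil => simp [fronts] at hc
    | cons a t =>
      rw [show fronts G (k + 1) (a :: t) v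
          = (a :: t) :: fronts G k (stepL G (a :: t) v).2 (stepL G (a :: t) v).1 from rfl] at hc
      rcases List.mem_cons.mp hc with rfl | hc
      · simp
      · exact ih _ _ c hc

-- (L8) fuel sufficiency under Pre_
theorem pv_items_ofList (graph : List (Int × List Int)) (hnd : (graph.map Prod.fst).Nodup) :
    (PySem.Dict.ofList graph).items = graph := by
  have h := PySem.Dict.items_foldl_insert_fresh graph Prod.fst Prod.snd PySem.Dict.empty
    (fun a _ => PySem.Dict.contains_empty _) hnd
  have h2 : List.map (fun a : Int × List Int => (a.1, a.2)) graph = graph := by simp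
  rw [h2] at h
  simpa using h

theorem pv_getD_mem (graph : List (Int × List Int)) (hnd : (graph.map Prod.fst).Nodup)
    (n x : Int) (hx : x ∈ (PySem.Dict.ofList graph).getD n []) :
    ∃ ns, (n, ns) ∈ graph ∧ x ∈ ns := by
  rw [PySem.Dict.getD_eq_get?_getD] at hx
  cases hg : (PySem.Dict.ofList graph).get? n with
  | none => rw [hg] at hx; simp at hx
  | some ns =>
    rw [hg] at hx
    have hm := PySem.Dict.mem_items_of_get?_eq_some _ hg
    rw [pv_items_ofList graph hnd] at hm
    exact ⟨ns, hm, by simpa using hx⟩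

theorem pv_expand_spec (G : PySem.Dict Int (List Int)) :
    ∀ (ns : List Int) (v : PySem.Set Int) (nxt : List Int),
      ∃ dl, ns.foldl (fun t x => if t.1.contains x then t else (PySem.Set.add t.1 x, t.2 ++ [x])) (v, nxt)
          = (v ++ dl, nxt ++ dl)
        ∧ (∀ x ∈ dl, x ∈ ns) ∧ (v.Nodup → (v ++ dl).Nodup) := by
  intro ns
  induction ns with
  | nil => intro v nxt; exact ⟨[], by simp, by simp, by simp⟩
  | cons x t ih =>
    intro v nxt
    simp only [List.foldl_cons]
    by_cases hx : v.contains x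
    · simp only [hx, if_true]
      obtain ⟨dl, he, hs, hn⟩ := ih v nxt
      exact ⟨dl, he, fun y hy => by simp [hs y hy], hn⟩
    · simp only [if_neg hx]
      have hxv : x ∉ v := fun hm => hx ((PySem.Set.contains_iff v x).mpr hm)
      rw [show PySem.Set.add v x = v ++ [x] from PySem.Set.add_of_not_mem hxv]
      obtain ⟨dl, he, hs, hn⟩ := ih (v ++ [x]) (nxt ++ [x])
      refine ⟨x :: dl, ?_, ?_, ?_⟩
      · rw [he]; simp
      · intro y hy
        rcases List.mem_cons.mp hy with rfl | hy
        · simp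
        · simp [hs y hy]
      · intro hv
        have hvx : (v ++ [x]).Nodup := by
          rw [List.nodup_append]
          exact ⟨hv, List.nodup_singleton x, fun a ha b hb => by
            simp only [List.mem_singleton] at hb; subst hb; exact fun h => hxv (h ▸ ha)⟩
        have := hn hvx
        simpa [List.append_assoc] using this

theorem pv_step_spec (G : PySem.Dict Int (List Int)) :
    ∀ (cur : List Int) (v : PySem.Set Int) (nxt : List Int),
      ∃ dl, cur.foldl (expandS G) (v, nxt) = (v ++ dl, nxt ++ dl)
        ∧ (∀ x ∈ dl, ∃ n ∈ cur, x ∈ G.getD n []) ∧ (v.Nodup → (v ++ dl).Nodup) := by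
  intro cur
  induction cur with
  | nil => intro v nxt; exact ⟨[], by simp, by simp, by simp⟩
  | cons c cs ih =>
    intro v nxt
    rw [List.foldl_cons]
    obtain ⟨d1, he1, hs1, hn1⟩ := pv_expand_spec G (G.getD c []) v nxt
    rw [show expandS G (v, nxt) c
        = (G.getD c []).foldl (fun t x => if t.1.contains x then t else (PySem.Set.add t.1 x, t.2 ++ [x])) (v, nxt) from rfl,
      he1]
    obtain ⟨d2, he2, hs2, hn2⟩ := ih (v ++ d1) (nxt ++ d1)
    refine ⟨d1 ++ d2, ?_, ?_, ?_⟩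
    · rw [he2]; simp
    · intro y hy
      rcases List.mem_append.mp hy with hy | hy
      · exact ⟨c, by simp, hs1 y hy⟩
      · obtain ⟨n, hn, hyn⟩ := hs2 y hy
        exact ⟨n, by simp [hn], hyn⟩
    · intro hv
      have := hn2 (hn1 hv)
      simpa [List.append_assoc] using this

theorem pv_meas_drop (K v dl : List Int) (hnd : (v ++ dl).Nodup) (hsub : ∀ x ∈ dl, x ∈ K) :
    ((K.dedup.filter (fun x => decide (x ∉ v ++ dl))).length + dl.length
      ≤ (K.dedup.filter (fun x => decide (x ∉ v))).length) := by
  have h := List.nodup_append.mp hnd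
  have hAn : (K.dedup.filter (fun x => decide (x ∉ v ++ dl))).Nodup := (List.nodup_dedup K).filter _
  have hnodup : ((K.dedup.filter (fun x => decide (x ∉ v ++ dl))) ++ dl).Nodup := by
    rw [List.nodup_append]
    refine ⟨hAn, h.2.1, ?_⟩
    intro a ha b hb
    have := (List.mem_filter.mp ha).2
    simp only [decide_eq_true_eq] at this
    intro hab
    exact this (hab ▸ List.mem_append.mpr (Or.inr hb))
  have hss : ((K.dedup.filter (fun x => decide (x ∉ v ++ dl))) ++ dl)
      ⊆ K.dedup.filter (fun x => decide (x ∉ v)) := by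
    intro y hy
    rcases List.mem_append.mp hy with hy | hy
    · obtain ⟨hyK, hyv⟩ := List.mem_filter.mp hy
      simp only [decide_eq_true_eq] at hyv
      exact List.mem_filter.mpr ⟨hyK, by simp only [decide_eq_true_eq]; exact fun h => hyv (List.mem_append.mpr (Or.inl h))⟩
    · refine List.mem_filter.mpr ⟨List.mem_dedup.mpr (hsub y hy), ?_⟩
      simp only [decide_eq_true_eq]
      intro hv
      exact h.2.2 y hv y hy rfl
  have := (List.subperm_of_subset hnodup hss).length_le
  simpa using this

theorem pv_nthF_nil (G : PySem.Dict Int (List Int)) : ∀ (k : Nat) (v : PySem.Set Int), nthF G k [] v = ([], v) := by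
  intro k
  induction k with
  | zero => intro v; rfl
  | succ k ih => intro v; exact ih v

theorem pv_update_delta : ∀ (l : List Int) (S : PySem.Set Int),
    ∃ d, PySem.Set.update S l = S ++ d ∧ ∀ x ∈ d, x ∈ l := by
  intro l
  induction l with
  | nil => intro S; exact ⟨[], by simp [PySem.Set.update], by simp⟩
  | cons x t ih =>
    intro S
    rw [show PySem.Set.update S (x :: t) = PySem.Set.update (PySem.Set.add S x) t from rfl]
    by_cases hx : x ∈ S
    · rw [PySem.Set.add_of_mem hx]
      obtain ⟨d, hd, hsub⟩ := ih S
      exact ⟨d, hd, fun y hy => by simp [hsub y hy]⟩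
    · rw [PySem.Set.add_of_not_mem hx]
      obtain ⟨d, hd, hsub⟩ := ih (S ++ [x])
      refine ⟨x :: d, by rw [hd]; simp, ?_⟩
      intro y hy
      rcases List.mem_cons.mp hy with rfl | hy
      · simp
      · simp [hsub y hy]

theorem pv_grow_delta (graph : List (Int × List Int)) (S : PySem.Set Int) :
    ∃ d, pvGrow graph S = S ++ d ∧ ∀ x ∈ d, x ∈ graph.map Prod.fst := by
  obtain ⟨d, hd, hsub⟩ := pv_update_delta
    ((graph.filter (fun p => S.contains p.1)).flatMap
      (fun p => p.2.filter (fun x => (graph.map Prod.fst).contains x))) S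
  refine ⟨d, hd, ?_⟩
  intro x hx
  obtain ⟨p, _, hxp⟩ := List.mem_flatMap.mp (hsub x hx)
  have := (List.mem_filter.mp hxp).2
  simpa using this

theorem pv_iter_fix (graph : List (Int × List Int)) {S : PySem.Set Int}
    (h : pvGrow graph S = S) : ∀ n, pvIter graph n S = S := by
  intro n
  induction n with
  | zero => rfl
  | succ n ih => show pvIter graph n (pvGrow graph S) = S; rw [h]; exact ih

theorem pv_iter_nodup (graph : List (Int × List Int)) :
    ∀ (n : Nat) (S : PySem.Set Int), S.Nodup → (pvIter graph n S).Nodup := by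
  intro n
  induction n with
  | zero => intro S h; exact h
  | succ n ih =>
    intro S h
    exact ih _ (PySem.Set.nodup_update _ _ h)

theorem pv_iter_sub (graph : List (Int × List Int)) :
    ∀ (n : Nat) (S : PySem.Set Int), ∀ x ∈ S, x ∈ pvIter graph n S := by
  intro n
  induction n with
  | zero => intro S x hx; exact hx
  | succ n ih =>
    intro S x hx
    obtain ⟨d, hd, _⟩ := pv_grow_delta graph S
    have : x ∈ pvGrow graph S := by rw [hd]; exact List.mem_append.mpr (Or.inl hx)
    exact ih _ x this

theorem pv_iter_bound (graph : List (Int × List Int)) (root : Int) :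
    ∀ (n : Nat) (S : PySem.Set Int), (∀ x ∈ S, x ∈ root :: graph.map Prod.fst) →
      ∀ x ∈ pvIter graph n S, x ∈ root :: graph.map Prod.fst := by
  intro n
  induction n with
  | zero => intro S h; exact h
  | succ n ih =>
    intro S h
    refine ih _ ?_
    intro x hx
    obtain ⟨d, hd, hsub⟩ := pv_grow_delta graph S
    rw [hd] at hx
    rcases List.mem_append.mp hx with hx | hx
    · exact h x hx
    · exact List.mem_cons_of_mem _ (hsub x hx)

theorem pv_pigeon (graph : List (Int × List Int)) :
    ∀ (n : Nat) (S : PySem.Set Int), S.Nodup →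
      pvGrow graph (pvIter graph n S) = pvIter graph n S ∨
        S.length + n ≤ (pvIter graph n S).length := by
  intro n
  induction n with
  | zero => intro S _; right; simp [pvIter]
  | succ n ih =>
    intro S hS
    by_cases hf : pvGrow graph S = S
    · left
      rw [pv_iter_fix graph hf]
      exact hf
    · obtain ⟨d, hd, _⟩ := pv_grow_delta graph S
      have hdne : d ≠ [] := by
        intro h0; rw [h0, List.append_nil] at hd; exact hf hd
      have hlen : S.length + 1 ≤ (pvGrow graph S).length := by
        rw [hd, List.length_append]
        have : 1 ≤ d.length := List.length_pos_iff.mpr hdne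
        omega
      rcases ih (pvGrow graph S) (PySem.Set.nodup_update _ _ hS) with h | h
      · left; exact h
      · right
        show S.length + (n + 1) ≤ (pvIter graph n (pvGrow graph S)).length
        omega

theorem pv_reach_fix (graph : List (Int × List Int)) (root : Int) :
    pvGrow graph (pvReach graph root) = pvReach graph root := by
  rcases pv_pigeon graph (graph.length + 1) (PySem.Set.ofList [root]) (by simp) with h | h
  · exact h
  · exfalso
    have hb : ∀ x ∈ pvReach graph root, x ∈ root :: graph.map Prod.fst :=
      pv_iter_bound graph root (graph.length + 1) _ (by simp)
    have hnd : (pvReach graph root).Nodup := pv_iter_nodup graph _ _ (by simp)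
    have hsub : pvReach graph root ⊆ (root :: graph.map Prod.fst).dedup :=
      fun x hx => List.mem_dedup.mpr (hb x hx)
    have h1 := (List.subperm_of_subset hnd hsub).length_le
    have h2 := (List.dedup_sublist (root :: graph.map Prod.fst)).length_le
    simp only [List.length_cons, List.length_map] at h2
    have h' : 1 + (graph.length + 1) ≤ (pvReach graph root).length := by
      have e : (PySem.Set.ofList [root] : PySem.Set Int).length = 1 := rfl
      rw [e] at h
      exact h
    omega

theorem pv_reach_closed (graph : List (Int × List Int)) (root : Int)
    (hnd : (graph.map Prod.fst).Nodup)
    (hcl : ∀ p ∈ graph, p.1 ∈ pvReach graph root → ∀ x ∈ p.2, x ∈ graph.map Prod.fst) :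
    ∀ n ∈ pvReach graph root, ∀ x ∈ (PySem.Dict.ofList graph).getD n [], x ∈ pvReach graph root := by
  intro n hn x hx
  obtain ⟨ns, hmem, hxns⟩ := pv_getD_mem graph hnd n x hx
  have hxK : x ∈ graph.map Prod.fst := hcl (n, ns) hmem hn x hxns
  have hxl : x ∈ (graph.filter (fun p => (pvReach graph root).contains p.1)).flatMap
      (fun p => p.2.filter (fun y => (graph.map Prod.fst).contains y)) := by
    refine List.mem_flatMap.mpr ⟨(n, ns), ?_, ?_⟩
    · exact List.mem_filter.mpr ⟨hmem, by simpa using (PySem.Set.contains_iff _ _).mpr hn⟩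
    · exact List.mem_filter.mpr ⟨hxns, by simpa using hxK⟩
  have := pv_reach_fix graph root
  rw [← this]
  exact (PySem.Set.mem_update _ _ _).mpr (Or.inr hxl)

theorem pv_count (G : PySem.Dict Int (List Int)) (K : List Int) (R : List Int)
    (hclosed : ∀ n ∈ R, ∀ x ∈ G.getD n [], x ∈ R) (hRK : ∀ x ∈ R, x ∈ K) :
    ∀ (k : Nat) (cur : List Int) (v : PySem.Set Int), v.Nodup →
      (∀ x ∈ cur, x ∈ v) → (∀ x ∈ v, x ∈ R) →
      cur.length + (K.dedup.filter (fun x => decide (x ∉ v))).length ≤ k →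
      (nthF G k cur v).1 = [] ∧
        ((fronts G k cur v).map List.length).sum
          ≤ cur.length + (K.dedup.filter (fun x => decide (x ∉ v))).length := by
  intro k
  induction k with
  | zero =>
    intro cur v _ _ _ hb
    have : cur = [] := List.length_eq_zero_iff.mp (by omega)
    subst this
    exact ⟨rfl, by simp [fronts]⟩
  | succ k ih =>
    intro cur v hv hcv hvR hb
    cases cur with
    | nil => exact ⟨by rw [pv_nthF_nil], by simp [fronts]⟩
    | cons c cs =>
      obtain ⟨dl, he, hsub0, hnd⟩ := pv_step_spec G (c :: cs) v []
      have hv' := hnd hv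
      have hdlR : ∀ x ∈ dl, x ∈ R := by
        intro x hx
        obtain ⟨n, hncur, hn⟩ := hsub0 x hx
        exact hclosed n (hvR n (hcv n hncur)) x hn
      have hdlK : ∀ x ∈ dl, x ∈ K := fun x hx => hRK x (hdlR x hx)
      have hkey := pv_meas_drop K v dl hv' hdlK
      have hst : stepL G (c :: cs) v = (v ++ dl, dl) := by
        rw [stepL, he]; simp
      have hb2 : dl.length + (K.dedup.filter (fun x => decide (x ∉ v ++ dl))).length ≤ k := by
        simp only [List.length_cons] at hb; omega
      obtain ⟨ih1, ih2⟩ := ih dl (v ++ dl) hv'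
        (fun x hx => List.mem_append.mpr (Or.inr hx))
        (fun x hx => (List.mem_append.mp hx).elim (hvR x) (hdlR x))
        hb2
      constructor
      · show (nthF G k (stepL G (c :: cs) v).2 (stepL G (c :: cs) v).1).1 = []
        rw [hst]
        exact ih1
      · rw [show fronts G (k + 1) (c :: cs) v
            = (c :: cs) :: fronts G k (stepL G (c :: cs) v).2 (stepL G (c :: cs) v).1 from rfl, hst]
        simp only [List.map_cons, List.sum_cons]
        omega

theorem fuel_suffices (graph : List (Int × List Int)) (root width spacer : Int)
    (h : Pre_calculate_pos graph root width spacer) :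
    (nthF (PySem.Dict.ofList graph) (graph.length + 1) [root] (PySem.Set.ofList [root])).1 = [] ∧
      ((fronts (PySem.Dict.ofList graph) (graph.length + 1) [root] (PySem.Set.ofList [root])).map List.length).sum
        ≤ graph.length + 1 := by
  obtain ⟨hnd, hroot, hcl⟩ := h
  have hclosed := pv_reach_closed graph root hnd hcl
  have hRK : ∀ x ∈ pvReach graph root, x ∈ graph.map Prod.fst := by
    intro x hx
    rcases List.mem_cons.mp (pv_iter_bound graph root (graph.length + 1) _ (by simp) x hx) with rfl | hx
    · exact hroot
    · exact hx
  have hmeas : ((graph.map Prod.fst).dedup.filter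
      (fun x => decide (x ∉ PySem.Set.ofList [root]))).length ≤ graph.length := by
    calc ((graph.map Prod.fst).dedup.filter (fun x => decide (x ∉ PySem.Set.ofList [root]))).length
        ≤ (graph.map Prod.fst).dedup.length := List.length_filter_le _ _
      _ ≤ (graph.map Prod.fst).length := (List.dedup_sublist _).length_le
      _ = graph.length := List.length_map ..
  have hrootR : root ∈ pvReach graph root :=
    pv_iter_sub graph (graph.length + 1) _ root (by simp)
  obtain ⟨h1, h2⟩ := pv_count (PySem.Dict.ofList graph) (graph.map Prod.fst) (pvReach graph root)
    hclosed hRK (graph.length + 1) [root] (PySem.Set.ofList [root])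
    (by simp)
    (fun x hx => by simpa using hx)
    (fun x hx => by
      have : x = root := by simpa using hx
      subst this; exact hrootR)
    (by simp only [List.length_cons, List.length_nil]; omega)
  exact ⟨h1, by simp only [List.length_cons, List.length_nil] at h2; omega⟩

-- ===== VERDICT (by name: the statement is the Claim_ definition above) =====
theorem calculate_pos_spec : Claim_equal_calculate_pos := by
  intro graph root width spacer _ hpre
  show calculate_pos graph root width spacer = calculate_pos_alt graph root width spacer
  obtain ⟨hnth, hsum⟩ := fuel_suffices graph root width spacer hpre
  simp only [calculate_pos, calculate_pos_alt]
  rw [show [((root : Int), (0 : Int))] = [root].map (fun m => (m, (0 : Int))) from rfl]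
  rw [bfsA_fronts (PySem.Dict.ofList graph) (graph.length + 1) [root] (PySem.Set.ofList [root])
    PySem.Dict.empty 0 (graph.length + 1) hnth hsum]
  rw [addLevels_items _ PySem.Dict.empty 0 (fronts_ne_nil _ _ _ _) (fun j _ => rfl)]
  rw [show (PySem.Dict.empty : PySem.Dict Int (List Int)).items = [] from rfl, List.nil_append]
  rw [pass2_posLevels]
  rw [levelB_fronts (PySem.Dict.ofList graph) width spacer (graph.length + 1) [root]
    (PySem.Set.ofList [root]) PySem.Dict.empty 0 (graph.length + 1) hnth le_rfl]
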